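-- pv_equiv track=rewrite | github.com/BlueCapacitor/Tree-Of-Life | Main.py | insertGaps
-- ===== SOURCE A (Python) =====
-- def insertGaps(a, b, gaps):
--     assert(len(gaps) <= min(len(a), len(b)))
--
--     outA = ''
--     outB = ''
--
--     for i in range(max(len(a), len(b))):
--         if(len(gaps) > i):
--             outA += '_' * gaps[i] if(gaps[i] > 0) else ''
--             outB += '_' * (0 - gaps[i]) if(gaps[i] < 0) else ''
--         outA += a[i] if(len(a) > i) else ''
--         outB += b[i] if(len(b) > i) else ''
--
--     return(outA, outB)
-- ===== SOURCE B (Python) =====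
-- def _withGaps(s, gaps, sign):
--     chars = list(s)
--     for i in range(len(gaps) - 1, -1, -1):
--         g = gaps[i] * sign
--         if g > 0:
--             chars.insert(i, '_' * g)
--     return ''.join(chars)
--
--
-- def insertGaps(a, b, gaps):
--     assert(len(gaps) <= min(len(a), len(b)))
--     return (_withGaps(a, gaps, 1), _withGaps(b, gaps, -1))
-- ===== Notes on version B (the rewrite author's own statement) =====
-- stated objective: alternative
-- what changed: Instead of A's single forward loop over range(max(len(a),len(b))) that concatenates gap underscores and characters onto two string accumulators, B converts each string to a list of its characters and walks the gaps back-to-front, splicing '_'*g in-place at position i with list.insert, then joins; done once per string with sign +1/-1.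
import Mathlib
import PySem

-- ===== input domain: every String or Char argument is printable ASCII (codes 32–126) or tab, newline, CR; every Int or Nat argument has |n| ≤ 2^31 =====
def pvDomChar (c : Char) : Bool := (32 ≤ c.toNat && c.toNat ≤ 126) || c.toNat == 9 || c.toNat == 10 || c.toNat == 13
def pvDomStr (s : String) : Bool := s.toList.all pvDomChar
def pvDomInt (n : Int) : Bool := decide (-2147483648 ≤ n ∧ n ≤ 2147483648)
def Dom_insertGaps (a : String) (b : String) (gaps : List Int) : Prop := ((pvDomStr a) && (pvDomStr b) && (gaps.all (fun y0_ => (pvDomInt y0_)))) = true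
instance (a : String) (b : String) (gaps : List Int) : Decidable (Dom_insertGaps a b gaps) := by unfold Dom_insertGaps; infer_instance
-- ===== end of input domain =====

-- B replaces A's fused forward loop building both outputs character by character with a
-- splice-in-place strategy: list(s), then walk the gaps back-to-front inserting '_'*g at
-- position i, once per string (objective: alternative decomposition, same cost).


-- ===== PORT A =====
-- single loop over range(max(len a, len b)) threading the pair (outA, outB)
def insertGaps (a : String) (b : String) (gaps : List Int) : String × String :=
  let al := a.toList
  let bl := b.toList
  let res := (List.range (max al.length bl.length)).foldl
    (fun (st : List Char × List Char) i =>
      (st.1 ++ ((if gaps.length > i then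
                   (if gaps.getD i 0 > 0 then List.replicate (gaps.getD i 0).toNat '_' else [])
                 else []) ++
                (if al.length > i then [al.getD i ' '] else [])),
       st.2 ++ ((if gaps.length > i then
                   (if gaps.getD i 0 < 0 then List.replicate (0 - gaps.getD i 0).toNat '_' else [])
                 else []) ++
                (if bl.length > i then [bl.getD i ' '] else []))))
    ([], [])
  (String.ofList res.1, String.ofList res.2)

-- ===== PORT B =====
-- helper _withGaps: chars = list(s) (each char its own part); walk i = len(gaps)-1 … 0,
-- splicing '_'*(gaps[i]*sign) in at position i when positive; ''.join at the end.
def pvWithGaps (s : List Char) (gaps : List Int) (sign : Int) : String :=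
  let chars : List (List Char) := s.map (fun c => [c])
  let res := ((List.range gaps.length).reverse).foldl
    (fun (st : List (List Char)) i =>
      if gaps.getD i 0 * sign > 0 then
        PySem.List.insert st (i : Int) (List.replicate (gaps.getD i 0 * sign).toNat '_')
      else st)
    chars
  String.ofList res.flatten

def insertGaps_alt (a : String) (b : String) (gaps : List Int) : String × String :=
  (pvWithGaps a.toList gaps 1, pvWithGaps b.toList gaps (-1))

-- ===== PRECONDITION & SPEC =====
-- A's assert: len(gaps) <= min(len(a), len(b)); otherwise A raises AssertionError
def Pre_insertGaps (a : String) (b : String) (gaps : List Int) : Prop :=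
  gaps.length ≤ min a.length b.length
instance (a : String) (b : String) (gaps : List Int) : Decidable (Pre_insertGaps a b gaps) := by
  unfold Pre_insertGaps; infer_instance

def pvWitness_insertGaps : String × String × List Int := ("abc", "xy", [1, -2])

def Spec_insertGaps (a : String) (b : String) (gaps : List Int) (out : String × String) : Prop := out = insertGaps_alt a b gaps
instance (a : String) (b : String) (gaps : List Int) (out : String × String) : Decidable (Spec_insertGaps a b gaps out) := by unfold Spec_insertGaps; infer_instance

-- ===== CLAIM (what is proved, stated in full; the proofs are below) =====
def Claim_equal_insertGaps : Prop := ∀ (a : String) (b : String) (gaps : List Int), Dom_insertGaps a b gaps → Pre_insertGaps a b gaps → Spec_insertGaps a b gaps (insertGaps a b gaps)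

-- ===== LEMMAS AND PROOFS =====

-- common interleaved form both ports are reduced to
def pvMix (s : List Char) (gaps : List Int) (sign : Int) : List Char :=
  (List.range s.length).flatMap (fun i =>
    (if i < gaps.length then
       (if gaps.getD i 0 * sign > 0 then List.replicate (gaps.getD i 0 * sign).toNat '_' else [])
     else []) ++ [s.getD i ' '])

-- the paired appending fold of A splits into two flatMaps
theorem pvFoldPair {α β : Type} (l : List α) (fA fB : α → List β) (x y : List β) :
    l.foldl (fun (st : List β × List β) i => (st.1 ++ fA i, st.2 ++ fB i)) (x, y)
      = (x ++ l.flatMap fA, y ++ l.flatMap fB) := by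
  induction l generalizing x y with
  | nil => simp
  | cons h t ih => simp [ih, List.flatMap_cons]

theorem pvFlatMapCongr {α β : Type} (l : List α) (f g : α → List β)
    (h : ∀ x ∈ l, f x = g x) : l.flatMap f = l.flatMap g := by
  induction l with
  | nil => rfl
  | cons a t ih =>
      simp only [List.flatMap_cons]
      rw [h a (by simp), ih (fun x hx => h x (by simp [hx]))]

theorem pvFlatMapRangeTrunc {β : Type} (m n : Nat) (f : Nat → List β)
    (hmn : m ≤ n) (h : ∀ i, m ≤ i → f i = []) :
    (List.range n).flatMap f = (List.range m).flatMap f := by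
  obtain ⟨k, rfl⟩ := Nat.exists_eq_add_of_le hmn
  rw [List.range_add, List.flatMap_append]
  have : ((List.range k).map (m + ·)).flatMap f = [] := by
    rw [List.flatMap_eq_nil_iff]
    intro x hx
    obtain ⟨j, _, rfl⟩ := List.mem_map.mp hx
    exact h _ (Nat.le_add_right _ _)
  simp [this]

theorem pvSideA (al : List Char) (gaps : List Int) (n : Nat)
    (hg : gaps.length ≤ al.length) (hn : al.length ≤ n) :
    (List.range n).flatMap (fun i =>
        (if gaps.length > i then
           (if gaps.getD i 0 > 0 then List.replicate (gaps.getD i 0).toNat '_' else [])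
         else []) ++
        (if al.length > i then [al.getD i ' '] else []))
      = pvMix al gaps 1 := by
  unfold pvMix
  rw [pvFlatMapRangeTrunc al.length n _ hn]
  · exact pvFlatMapCongr _ _ _ (by
      intro i hi
      have hi' : i < al.length := List.mem_range.mp hi
      simp [mul_one, hi'])
  · intro i hi
    have h1 : ¬ gaps.length > i := by omega
    have h2 : ¬ al.length > i := by omega
    simp [h1, h2]

theorem pvSideB (bl : List Char) (gaps : List Int) (n : Nat)
    (hg : gaps.length ≤ bl.length) (hn : bl.length ≤ n) :
    (List.range n).flatMap (fun i =>
        (if gaps.length > i then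
           (if gaps.getD i 0 < 0 then List.replicate (0 - gaps.getD i 0).toNat '_' else [])
         else []) ++
        (if bl.length > i then [bl.getD i ' '] else []))
      = pvMix bl gaps (-1) := by
  unfold pvMix
  rw [pvFlatMapRangeTrunc bl.length n _ hn]
  · exact pvFlatMapCongr _ _ _ (by
      intro i hi
      have hi' : i < bl.length := List.mem_range.mp hi
      simp [hi'])
  · intro i hi
    have h1 : ¬ gaps.length > i := by omega
    have h2 : ¬ bl.length > i := by omega
    simp [h1, h2]

-- pvMix on nil gaps is just the string
theorem pvMixNil (s : List Char) : pvMix s [] sign = s := by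
  unfold pvMix
  induction s with
  | nil => simp
  | cons c cs ih =>
      rw [List.length_cons, List.range_succ_eq_map, List.flatMap_cons, List.flatMap_map]
      simp only [List.getD_cons_succ]
      simpa using ih

-- pvMix unfolds one character/gap pair
theorem pvMixCons (c : Char) (cs : List Char) (g : Int) (gs : List Int) (sign : Int) :
    pvMix (c :: cs) (g :: gs) sign
      = (if g * sign > 0 then List.replicate (g * sign).toNat '_' else []) ++ c :: pvMix cs gs sign := by
  unfold pvMix
  simp only [List.length_cons]
  rw [List.range_succ_eq_map, List.flatMap_cons, List.flatMap_map]
  simp only [List.getD_cons_succ, List.getD_cons_zero, Nat.zero_lt_succ, if_pos,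
    Nat.succ_lt_succ_iff]
  simp

-- skipping a fixed head: insertions at positions i+1 act on the tail at position i
theorem pvShift (gs : List Int) (sign : Int) (l : List Nat) (c : List Char)
    (rest : List (List Char)) (hl : ∀ i ∈ l, i ≤ rest.length) :
    l.foldl (fun (st : List (List Char)) i =>
        if gs.getD i 0 * sign > 0 then
          PySem.List.insert st ((i + 1 : Nat) : Int)
            (List.replicate (gs.getD i 0 * sign).toNat '_')
        else st) (c :: rest)
      = c :: l.foldl (fun (st : List (List Char)) i =>
          if gs.getD i 0 * sign > 0 then
            PySem.List.insert st ((i : Nat) : Int) (List.replicate (gs.getD i 0 * sign).toNat '_')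
          else st) rest := by
  induction l generalizing rest with
  | nil => simp
  | cons j t ih =>
      simp only [List.foldl_cons]
      have hj : j ≤ rest.length := hl j (by simp)
      by_cases hc : gs.getD j 0 * sign > 0
      · rw [if_pos hc, if_pos hc]
        have h1 : PySem.List.insert (c :: rest) ((j + 1 : Nat) : Int)
            (List.replicate (gs.getD j 0 * sign).toNat '_')
            = c :: PySem.List.insert rest ((j : Nat) : Int)
                (List.replicate (gs.getD j 0 * sign).toNat '_') := by
          rw [PySem.List.insert_natCast _ _ _ (by simpa using Nat.succ_le_succ hj),
              PySem.List.insert_natCast _ _ _ hj]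
          simp [List.take_succ_cons, List.drop_succ_cons]
        rw [h1]
        apply ih
        intro i hi
        rw [PySem.List.insert_natCast _ _ _ hj]
        have := hl i (by simp [hi])
        simp
        omega
      · rw [if_neg hc, if_neg hc]
        exact ih rest (fun i hi => hl i (by simp [hi]))

-- joining the singleton parts gives back the string
theorem pvFlattenSing (s : List Char) : (s.map (fun c => [c])).flatten = s := by
  induction s with
  | nil => rfl
  | cons c cs ih => simp [ih]

-- B's back-to-front splicing fold computes the interleaved form
theorem pvWithGapsEq (gaps : List Int) (s : List Char) (sign : Int)
    (h : gaps.length ≤ s.length) :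
    pvWithGaps s gaps sign = String.ofList (pvMix s gaps sign) := by
  induction gaps generalizing s with
  | nil =>
      unfold pvWithGaps
      simp [pvFlattenSing, pvMixNil]
  | cons g gs ih =>
      cases s with
      | nil => simp at h
      | cons c cs =>
          have hcs : gs.length ≤ cs.length := by simpa using h
          unfold pvWithGaps
          simp only [List.length_cons, List.map_cons]
          rw [List.range_succ_eq_map, List.reverse_cons,
            show (List.map Nat.succ (List.range gs.length)).reverse
               = (List.range gs.length).reverse.map Nat.succ from by simp,
            List.foldl_append, List.foldl_map, List.foldl_cons, List.foldl_nil]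
          simp only [Nat.succ_eq_add_one, List.getD_cons_succ]
          rw [pvShift gs sign _ [c] (cs.map (fun c => [c]))
              (by intro i hi; simp at hi ⊢; omega)]
          have hinner := ih cs hcs
          unfold pvWithGaps at hinner
          simp only [] at hinner
          have hflat : ((List.range gs.length).reverse.foldl
              (fun (st : List (List Char)) i =>
                if gs.getD i 0 * sign > 0 then
                  PySem.List.insert st ((i : Nat) : Int)
                    (List.replicate (gs.getD i 0 * sign).toNat '_')
                else st) (cs.map (fun c => [c]))).flatten = pvMix cs gs sign := by
            rw [String.ofList_inj] at hinner
            exact hinner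
          rw [pvMixCons]
          by_cases hg : g * sign > 0
          · simp only [List.getD_cons_zero, if_pos hg, Nat.cast_zero, PySem.List.insert_zero,
              List.flatten_cons]
            rw [hflat]
            simp
          · simp only [List.getD_cons_zero, if_neg hg, List.flatten_cons]
            rw [hflat]
            simp

-- ===== VERDICT (by name: the statement is the Claim_ definition above) =====
theorem insertGaps_spec : Claim_equal_insertGaps := by
  intro a b gaps _ hpre
  have hga : gaps.length ≤ a.toList.length := by
    have := hpre; unfold Pre_insertGaps at this
    simpa using le_trans this (min_le_left _ _)
  have hgb : gaps.length ≤ b.toList.length := by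
    have := hpre; unfold Pre_insertGaps at this
    simpa using le_trans this (min_le_right _ _)
  unfold Spec_insertGaps insertGaps insertGaps_alt
  dsimp only
  rw [pvFoldPair]
  simp only [List.nil_append]
  rw [pvSideA a.toList gaps _ hga (le_max_left _ _),
      pvSideB b.toList gaps _ hgb (le_max_right _ _),
      pvWithGapsEq gaps a.toList 1 hga, pvWithGapsEq gaps b.toList (-1) hgb]
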